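-- pv_equiv track=rewrite | github.com/dianarrmiranda/1Ano_EI | FudamentosProg/aula10/treino.py | unload
-- ===== SOURCE A (Python) =====
-- def cargoQuantidade(t,m):
--     num =0
--     for tupl in t:
--         if tupl[0]==m:
--             num +=tupl[1]
--     return num
--
-- def unload(t, m, q):
--     num = cargoQuantidade(t,m)
--     if num < q:
--         for i in range(len(t)-1,-1,-1):
--             if t[i][0]==m:
--                 t.pop(i)
--         return q-num
--     else:
--         for i in range(len(t)-1,-1,-1):
--             if t[i][0] ==m:
--                 temp = t[i][1]
--                 t[i][1]-=q
--                 if t[i][1]<=0: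
--                     q-=temp
--                     t.pop(i)
--                 else:
--                     break
--         return cargoQuantidade(t,m)
-- ===== SOURCE B (Python) =====
-- def unload(t, m, q):
--     # One backward pass with a running sum and a single rebuild of t.
--     num = sum(x[1] for x in t if x[0] == m)
--     if num < q:
--         t[:] = [x for x in t if x[0] != m]
--         return q - num
--     out_rev = []
--     r = q
--     consuming = True
--     for x in reversed(t):
--         if consuming and x[0] == m:
--             if x[1] <= r:
--                 r -= x[1]
--                 continue
--             x[1] -= r
--             consuming = False
--         out_rev.append(x)
--     t[:] = out_rev[::-1]
--     return sum(x[1] for x in t if x[0] == m)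
-- ===== Notes on version B (the rewrite author's own statement) =====
-- stated objective: alternative
-- what changed: Replaces A's three separate passes with repeated t.pop(i) inside a backward index loop by a single backward pass carrying a running remaining-quantity and a consuming flag, rebuilding the list once.
-- outside the precondition, e.g. on unload([[5]], 5, 1): A raises IndexError, B raises IndexError; on unload([[]], 5, 1): A raises IndexError, B raises IndexError
import Mathlib
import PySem

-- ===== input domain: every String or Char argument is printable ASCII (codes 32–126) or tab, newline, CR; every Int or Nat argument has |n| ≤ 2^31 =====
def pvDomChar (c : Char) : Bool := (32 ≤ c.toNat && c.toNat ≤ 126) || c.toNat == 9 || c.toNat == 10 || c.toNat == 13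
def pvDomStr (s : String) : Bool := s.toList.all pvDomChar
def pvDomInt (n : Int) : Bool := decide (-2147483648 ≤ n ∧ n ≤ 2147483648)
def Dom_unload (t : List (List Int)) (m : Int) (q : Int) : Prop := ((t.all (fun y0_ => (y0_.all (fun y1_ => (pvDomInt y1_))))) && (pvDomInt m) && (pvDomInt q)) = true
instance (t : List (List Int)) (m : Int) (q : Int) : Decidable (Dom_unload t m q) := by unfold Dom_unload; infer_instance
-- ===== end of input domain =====

-- B replaces A's three passes with repeated pop-and-rescan by one backward pass with a running sum and a single rebuild.
-- A mutates t in place; B performs the equivalent mutation (same final contents); the theorems below are about the return value.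

-- ===== PORT A =====
-- cargoQuantidade: the pyGetD defaults are unreachable under Pre_unload (tupl[0]/tupl[1] are in range there).
def pvCargo (t : List (List Int)) (m : Int) : Int :=
  t.foldl (fun num tupl =>
    if PySem.List.pyGetD tupl 0 0 == m then num + PySem.List.pyGetD tupl 1 0 else num) 0

-- body of the num < q loop: 'if t[i][0]==m: t.pop(i)'
def pvStepPop (m : Int) (ts : List (List Int)) (i : Int) : List (List Int) :=
  if PySem.List.pyGetD (PySem.List.pyGetD ts i []) 0 0 == m then
    ((PySem.List.pop? ts i).map Prod.snd).getD ts
  else ts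

-- body of the else-branch loop; state (t, q, broke); 't[i][1] -= q' is the set at index 1/index i (i ≥ 0 from the countdown range)
def pvStep2 (m : Int) (st : List (List Int) × Int × Bool) (i : Int) : List (List Int) × Int × Bool :=
  if st.2.2 then st
  else
    let inner := PySem.List.pyGetD st.1 i []
    if PySem.List.pyGetD inner 0 0 == m then
      let temp := PySem.List.pyGetD inner 1 0
      let ts1 := st.1.set i.toNat (inner.set 1 (temp - st.2.1))   -- t[i][1] -= q
      if temp - st.2.1 ≤ 0 then
        (((PySem.List.pop? ts1 i).map Prod.snd).getD ts1, st.2.1 - temp, st.2.2)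
      else
        (ts1, st.2.1, true)                                        -- break
    else st

def unload (t : List (List Int)) (m : Int) (q : Int) : Int :=
  let num := pvCargo t m
  if num < q then
    -- the pop-all loop only mutates t; the return value is q - num
    let _mut := (PySem.List.pyRange ((t.length : Int) - 1) (-1) (-1)).foldl (pvStepPop m) t
    q - num
  else
    let st := (PySem.List.pyRange ((t.length : Int) - 1) (-1) (-1)).foldl (pvStep2 m) (t, q, false)
    pvCargo st.1 m

-- ===== PORT B =====
-- sum(x[1] for x in t if x[0] == m)
def pvSumM (t : List (List Int)) (m : Int) : Int :=
  ((t.filter (fun x => PySem.List.pyGetD x 0 0 == m)).map (fun x => PySem.List.pyGetD x 1 0)).sum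

-- body of B's single backward pass; state (out_rev, r, consuming)
def pvStepB (m : Int) (st : List (List Int) × Int × Bool) (x : List Int) : List (List Int) × Int × Bool :=
  if st.2.2 && (PySem.List.pyGetD x 0 0 == m) then
    if PySem.List.pyGetD x 1 0 ≤ st.2.1 then (st.1, st.2.1 - PySem.List.pyGetD x 1 0, st.2.2)
    else (st.1 ++ [x.set 1 (PySem.List.pyGetD x 1 0 - st.2.1)], st.2.1, false)
  else (st.1 ++ [x], st.2.1, st.2.2)

def unload_alt (t : List (List Int)) (m : Int) (q : Int) : Int :=
  let num := pvSumM t m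
  if num < q then q - num
  else
    let st := t.reverse.foldl (pvStepB m) ([], q, true)   -- for x in reversed(t)
    pvSumM st.1.reverse m                                 -- out_rev[::-1], then the final sum

-- ===== PRECONDITION & SPEC =====
-- Pre_ excludes exactly the inputs where Python A raises IndexError: an empty cargo entry, or an
-- entry for m with no quantity field.
def Pre_unload (t : List (List Int)) (m : Int) (q : Int) : Prop :=
  ∀ x ∈ t, x ≠ [] ∧ (x.head? = some m → 2 ≤ x.length)
instance (t : List (List Int)) (m : Int) (q : Int) : Decidable (Pre_unload t m q) := by
  unfold Pre_unload; infer_instance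
def pvWitness_unload : List (List Int) × Int × Int := ([[1, 2], [3, 4]], 1, 1)

def Spec_unload (t : List (List Int)) (m : Int) (q : Int) (out : Int) : Prop := out = unload_alt t m q
instance (t : List (List Int)) (m : Int) (q : Int) (out : Int) : Decidable (Spec_unload t m q out) := by unfold Spec_unload; infer_instance

-- ===== CLAIM (what is proved, stated in full; the proofs are below) =====
def Claim_equal_unload : Prop := ∀ (t : List (List Int)) (m : Int) (q : Int), Dom_unload t m q → Pre_unload t m q → Spec_unload t m q (unload t m q)

-- ===== LEMMAS AND PROOFS =====

theorem eraseIdx_append_mid {α : Type} (ps rest : List α) (x : α) :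
    (ps ++ x :: rest).eraseIdx ps.length = ps ++ rest := by
  induction ps with
  | nil => simp
  | cons a as ih => simp [ih]

theorem pop_mid (ps rest : List (List Int)) (x : List Int) :
    PySem.List.pop? (ps ++ x :: rest) (ps.length : Int) = some (x, ps ++ rest) := by
  rw [PySem.List.pop?_natCast (ps ++ x :: rest) ps.length (by simp)]
  simp [eraseIdx_append_mid, List.getElem_append_right]

theorem cargo_aux (m : Int) (t : List (List Int)) : ∀ (a : Int),
    t.foldl (fun num tupl =>
      if PySem.List.pyGetD tupl 0 0 == m then num + PySem.List.pyGetD tupl 1 0 else num) a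
      = a + pvSumM t m := by
  induction t with
  | nil => intro a; simp [pvSumM]
  | cons x xs ih =>
    intro a
    simp only [List.foldl_cons]
    rw [ih]
    by_cases hx : PySem.List.pyGetD x 0 0 = m
    · simp [pvSumM, hx]; ring
    · simp [pvSumM, hx]

theorem cargo_eq_sum (m : Int) (t : List (List Int)) : pvCargo t m = pvSumM t m := by
  unfold pvCargo
  simpa using cargo_aux m t 0

theorem loop_eq (m : Int) (pre out : List (List Int)) (q : Int) (br : Bool) :
    (PySem.List.pyRange ((pre.length : Int) - 1) (-1) (-1)).foldl (pvStep2 m) (pre ++ out.reverse, q, br)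
      = ((pre.reverse.foldl (pvStepB m) (out, q, !br)).1.reverse,
         (pre.reverse.foldl (pvStepB m) (out, q, !br)).2.1,
         !(pre.reverse.foldl (pvStepB m) (out, q, !br)).2.2) := by
  induction pre using List.reverseRecOn generalizing out q br with
  | nil =>
    simp [PySem.List.pyRange_neg_one_eq_nil]
  | append_singleton ps x ih =>
    have hlen : ((ps ++ [x]).length : Int) - 1 = (ps.length : Int) := by
      simp only [List.length_append, List.length_cons, List.length_nil]
      push_cast; ring
    rw [hlen, PySem.List.pyRange_neg_one_cons (by omega), List.foldl_cons]
    have hmid : (ps ++ [x]) ++ out.reverse = ps ++ x :: out.reverse := by simp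
    have hget : PySem.List.pyGetD (ps ++ x :: out.reverse) (ps.length : Int) ([] : List Int) = x := by
      simp
    have hrev : (ps ++ [x]).reverse = x :: ps.reverse := by simp
    rw [hmid, hrev, List.foldl_cons]
    by_cases hbr : br
    · -- A: broke already, skip; B: consuming = false, append x
      subst hbr
      have hA : pvStep2 m (ps ++ x :: out.reverse, q, true) (ps.length : Int)
          = (ps ++ x :: out.reverse, q, true) := by simp [pvStep2]
      have hB : pvStepB m (out, q, !true) x = (out ++ [x], q, !true) := by simp [pvStepB]
      rw [hA, hB]
      have := ih (out ++ [x]) q true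
      simpa using this
    · simp only [Bool.not_eq_true] at hbr; subst hbr
      by_cases hx : PySem.List.pyGetD x 0 0 == m
      · set x1 := PySem.List.pyGetD x 1 0 with hx1
        by_cases hle : x1 - q ≤ 0
        · -- consume x entirely: A sets then pops index ps.length; B subtracts from r
          have hA : pvStep2 m (ps ++ x :: out.reverse, q, false) (ps.length : Int)
              = (ps ++ out.reverse, q - x1, false) := by
            simp only [pvStep2, hget, hx, Bool.false_eq_true, if_false, ← hx1, hle,
              if_pos]
            have hset : (ps ++ x :: out.reverse).set ((ps.length : Int)).toNat
                (x.set 1 (x1 - q)) = ps ++ (x.set 1 (x1 - q)) :: out.reverse := by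
              simp
            rw [hset, pop_mid]
            simp
          have hB : pvStepB m (out, q, !false) x = (out, q - x1, !false) := by
            simp [pvStepB, hx, ← hx1, show x1 ≤ q by omega]
          rw [hA, hB]
          simpa using ih out (q - x1) false
        · -- partial: A sets index and breaks; B appends the reduced entry, consuming := false
          have hA : pvStep2 m (ps ++ x :: out.reverse, q, false) (ps.length : Int)
              = (ps ++ (x.set 1 (x1 - q)) :: out.reverse, q, true) := by
            simp only [pvStep2, hget, hx, Bool.false_eq_true, if_false, ← hx1, hle]
            simp
          have hB : pvStepB m (out, q, !false) x
              = (out ++ [x.set 1 (x1 - q)], q, false) := by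
            simp [pvStepB, hx, ← hx1, show ¬ x1 ≤ q by omega]
          rw [hA, hB]
          have := ih (out ++ [x.set 1 (x1 - q)]) q true
          simpa using this
      · -- not cargo m: A skips, B appends
        have hA : pvStep2 m (ps ++ x :: out.reverse, q, false) (ps.length : Int)
            = (ps ++ x :: out.reverse, q, false) := by simp [pvStep2, hget, hx]
        have hB : pvStepB m (out, q, !false) x = (out ++ [x], q, !false) := by
          simp [pvStepB, hx]
        rw [hA, hB]
        simpa using ih (out ++ [x]) q false

-- ===== VERDICT (by name: the statement is the Claim_ definition above) =====
theorem unload_spec : Claim_equal_unload := by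
  intro t m q _ _
  unfold Spec_unload unload unload_alt
  rw [cargo_eq_sum]
  by_cases h : pvSumM t m < q
  · simp [h]
  · have := loop_eq m t [] q false
    simp only [List.reverse_nil, List.append_nil] at this
    simp [h, this, cargo_eq_sum]
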